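-- pv_equiv track=rewrite | github.com/Levelent/CompChallenge | Practice Problems/Filter/filter_3.py | filter_sums
-- ===== SOURCE A (Python) =====
-- from typing import List
-- from itertools import combinations
--
-- def filter_sums(nums: List[int]) -> List[int]:
--     idx_combs = combinations(range(len(nums)), 2)
--
--     sum_data = []
--     for tup in idx_combs:
--         this_sum = nums[tup[0]] + nums[tup[1]]
--         sum_data.append([this_sum, tup[0], tup[1]])
--
--     filtered = []
--     for i in range(len(nums)):
--         for s in sum_data:
--             if s[0] == nums[i] and s[1] != i != s[2]:
--                 break
--         else:
--             filtered.append(nums[i])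
--
--     return filtered
-- ===== SOURCE B (Python) =====
-- from typing import List
--
-- def filter_sums(nums: List[int]) -> List[int]:
--     count = {}
--     for v in nums:
--         count[v] = count.get(v, 0) + 1
--
--     filtered = []
--     for i, x in enumerate(nums):
--         found = False
--         for j, v in enumerate(nums):
--             if j == i:
--                 continue
--             y = x - v
--             c = count.get(y, 0) - (1 if y == x else 0) - (1 if y == v else 0)
--             if c > 0:
--                 found = True
--                 break
--         if not found:
--             filtered.append(x)
--     return filtered
-- ===== Notes on version B (the rewrite author's own statement) =====
-- stated objective: faster
-- what changed: A precomputes the full O(n^2) table of pair sums with their index pairs and rescans the whole table for every element (O(n^3)); B builds a value->count dictionary once and, per element x and per candidate partner nums[j], decides in O(1) from the counts (discounting the occurrences at the two forbidden indices i and j) whether a complement x-nums[j] exists at a third index, giving O(n^2).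
import Mathlib
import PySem

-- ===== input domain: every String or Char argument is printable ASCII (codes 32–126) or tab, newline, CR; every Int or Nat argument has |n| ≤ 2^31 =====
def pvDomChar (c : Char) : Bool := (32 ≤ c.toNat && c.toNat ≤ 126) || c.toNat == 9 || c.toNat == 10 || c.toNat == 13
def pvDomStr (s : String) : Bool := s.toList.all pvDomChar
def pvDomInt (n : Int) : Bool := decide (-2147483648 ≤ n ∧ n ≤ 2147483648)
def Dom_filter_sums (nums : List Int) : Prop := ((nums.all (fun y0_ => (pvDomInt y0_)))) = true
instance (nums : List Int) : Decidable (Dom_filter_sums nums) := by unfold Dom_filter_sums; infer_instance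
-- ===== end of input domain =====

-- B replaces A's precomputed O(n^2) list of pair sums scanned per element (O(n^3) total) by a
-- value-count dictionary consulted per candidate partner (O(n^2) total); same return value.

-- ===== PORT A =====
-- All subscripts nums[tup[0]], nums[tup[1]], nums[i] use indices drawn from range(len(nums)),
-- so they are always in range and pyGetD … 0 is exact there.
def filter_sums (nums : List Int) : List Int :=
  let idx_combs := PySem.List.combinations (PySem.List.pyRange 0 (nums.length : Int) 1) 2
  let sum_data : List (Int × Int × Int) := idx_combs.foldl (fun acc tup =>
    acc ++ [(PySem.List.pyGetD nums (PySem.List.pyGetD tup 0 0) 0 +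
             PySem.List.pyGetD nums (PySem.List.pyGetD tup 1 0) 0,
             PySem.List.pyGetD tup 0 0, PySem.List.pyGetD tup 1 0)]) []
  (PySem.List.pyRange 0 (nums.length : Int) 1).foldl (fun acc i =>
    if sum_data.any (fun s =>
        s.1 == PySem.List.pyGetD nums i 0 && s.2.1 != i && i != s.2.2)
    then acc
    else acc ++ [PySem.List.pyGetD nums i 0]) []

-- ===== PORT B =====
def filter_sums_alt (nums : List Int) : List Int :=
  let count : PySem.Dict Int Int :=
    nums.foldl (fun d v => d.insert v (d.getD v 0 + 1)) PySem.Dict.empty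
  (PySem.List.enumerate nums 0).foldl (fun acc p =>
    let found := (PySem.List.enumerate nums 0).any (fun q =>
      q.1 != p.1 &&
      decide (0 < count.getD (p.2 - q.2) 0
                - (if p.2 - q.2 == p.2 then 1 else 0)
                - (if p.2 - q.2 == q.2 then 1 else 0)))
    if found then acc else acc ++ [p.2]) []

-- ===== PRECONDITION & SPEC =====
def Spec_filter_sums (nums : List Int) (out : List Int) : Prop := out = filter_sums_alt nums
instance (nums : List Int) (out : List Int) : Decidable (Spec_filter_sums nums out) := by unfold Spec_filter_sums; infer_instance

-- ===== CLAIM (what is proved, stated in full; the proofs are below) =====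
def Claim_equal_filter_sums : Prop := ∀ (nums : List Int), Dom_filter_sums nums → Spec_filter_sums nums (filter_sums nums)

-- ===== LEMMAS AND PROOFS =====

-- value at a (Nat) index
def pvG (nums : List Int) (k : Nat) : Int := nums.getD k 0

-- A's found-condition for scan index i, as a proposition
def pvCondA (nums : List Int) (i : Int) : Prop :=
  ∃ j k : Nat, j < k ∧ k < nums.length ∧
    pvG nums j + pvG nums k = PySem.List.pyGetD nums i 0 ∧ (j : Int) ≠ i ∧ (k : Int) ≠ i

-- B's found-condition for scan index i with value x, as a proposition
def pvCondB (nums : List Int) (i : Int) (x : Int) : Prop :=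
  ∃ j : Nat, j < nums.length ∧ (j : Int) ≠ i ∧
    0 < (List.count (x - pvG nums j) nums : Int)
        - (if x - pvG nums j = x then 1 else 0)
        - (if x - pvG nums j = pvG nums j then 1 else 0)

-- a skip-or-append loop is a filter-and-map
theorem pv_foldl_skip {α β : Type} (p : α → Bool) (f : α → β) (l : List α) :
    l.foldl (fun acc x => if p x then acc else acc ++ [f x]) [] =
      (l.filter (fun x => !p x)).map f := by
  rw [PySem.List.foldl_congr_mem l _ (fun acc x => if !p x then acc ++ [f x] else acc) []
        (by intro acc x _; cases h : p x <;> simp [h]),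
      PySem.List.foldl_append_if]
  simp

-- membership in combinations(range(n), 2)
theorem pv_mem_comb2 (n : Int) (c : List Int) :
    c ∈ PySem.List.combinations (PySem.List.pyRange 0 n 1) 2 ↔
      ∃ a b : Int, 0 ≤ a ∧ a < b ∧ b < n ∧ c = [a, b] := by
  rw [PySem.List.mem_combinations_iff]
  constructor
  · rintro ⟨hsub, hlen⟩
    match c, hlen with
    | [a, b], _ =>
      have hpw := List.Pairwise.sublist hsub (PySem.List.pairwise_lt_pyRange_one 0 n)
      have hab : a < b := by simpa using hpw
      have ha : a ∈ PySem.List.pyRange 0 n 1 := hsub.mem (by simp)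
      have hb : b ∈ PySem.List.pyRange 0 n 1 := hsub.mem (by simp)
      rw [PySem.List.mem_pyRange_one] at ha hb
      exact ⟨a, b, ha.1, hab, hb.2, rfl⟩
  · rintro ⟨a, b, ha, hab, hb, rfl⟩
    refine ⟨?_, rfl⟩
    have : PySem.List.pyRange 0 n 1 = PySem.List.pyRange 0 (a+1) 1 ++ PySem.List.pyRange (a+1) n 1 :=
      PySem.List.pyRange_one_append 0 (a+1) n (by omega) (by omega)
    rw [this]
    have h1 : [a].Sublist (PySem.List.pyRange 0 (a+1) 1) := by
      rw [List.singleton_sublist, PySem.List.mem_pyRange_one]; omega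
    have h2 : [b].Sublist (PySem.List.pyRange (a+1) n 1) := by
      rw [List.singleton_sublist, PySem.List.mem_pyRange_one]; omega
    exact h1.append h2

-- count as a sum over indices
theorem pv_count_eq_sum (l : List Int) (y : Int) :
    (List.count y l : Int) =
      ∑ k ∈ Finset.range l.length, if l.getD k 0 = y then (1 : Int) else 0 := by
  induction l with
  | nil => simp
  | cons a t ih =>
    rw [List.count_cons, List.length_cons, Finset.sum_range_succ']
    simp only [List.getD_cons_succ, List.getD_cons_zero]
    rw [← ih]
    push_cast
    by_cases h : a = y <;> simp [h, beq_iff_eq]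

-- the count minus the two excluded indices is positive iff a third index exists
theorem pv_L2 (n i j : Nat) (S : Nat → Prop) [DecidablePred S]
    (hi : i < n) (hj : j < n) (hij : i ≠ j) :
    (0 < (∑ k ∈ Finset.range n, if S k then (1 : Int) else 0)
          - (if S i then 1 else 0) - (if S j then 1 else 0)) ↔
      ∃ k, k < n ∧ k ≠ i ∧ k ≠ j ∧ S k := by
  have hsplit : (∑ k ∈ Finset.range n, if S k then (1 : Int) else 0)
      = (∑ k ∈ Finset.range n, if S k ∧ k ≠ i ∧ k ≠ j then (1 : Int) else 0)
        + (if S i then 1 else 0) + (if S j then 1 else 0) := by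
    have h1 : ∀ k ∈ Finset.range n, (if S k then (1 : Int) else 0)
        = (if S k ∧ k ≠ i ∧ k ≠ j then (1 : Int) else 0)
          + (if k = i then (if S k then (1:Int) else 0) else 0)
          + (if k = j then (if S k then (1:Int) else 0) else 0) := by
      intro k _
      by_cases hki : k = i <;> by_cases hkj : k = j <;> by_cases hs : S k <;>
        simp_all
    rw [Finset.sum_congr rfl h1, Finset.sum_add_distrib, Finset.sum_add_distrib,
        Finset.sum_ite_eq' (Finset.range n) i, Finset.sum_ite_eq' (Finset.range n) j]
    simp [Finset.mem_range.mpr hi, Finset.mem_range.mpr hj]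
  rw [hsplit]
  have hpos : (0 < ∑ k ∈ Finset.range n, if S k ∧ k ≠ i ∧ k ≠ j then (1 : Int) else 0)
      ↔ ∃ k, k < n ∧ k ≠ i ∧ k ≠ j ∧ S k := by
    have hnn : ∀ k ∈ Finset.range n, (0:Int) ≤ if S k ∧ k ≠ i ∧ k ≠ j then (1 : Int) else 0 := by
      intro k _; split <;> norm_num
    constructor
    · intro h
      by_contra hc
      push Not at hc
      have : (∑ k ∈ Finset.range n, if S k ∧ k ≠ i ∧ k ≠ j then (1 : Int) else 0) = 0 := by
        apply Finset.sum_eq_zero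
        intro k hk
        rw [Finset.mem_range] at hk
        have := hc k hk
        split
        · rename_i hS; exact absurd (this hS.2.1 hS.2.2) (by simp [hS.1])
        · rfl
      omega
    · rintro ⟨k, hk, hki, hkj, hS⟩
      calc (0:Int) < 1 := by norm_num
        _ = (if S k ∧ k ≠ i ∧ k ≠ j then (1 : Int) else 0) := by simp [hS, hki, hkj]
        _ ≤ _ := Finset.single_le_sum hnn (by simpa using hk)
  rw [← hpos]
  constructor <;> intro h <;> linarith

-- A's inner scan of the pair-sum table finds a sum iff pvCondA
theorem pv_A_any (nums : List Int) (i : Int) :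
    ((PySem.List.combinations (PySem.List.pyRange 0 (nums.length : Int) 1) 2).map (fun tup =>
      (PySem.List.pyGetD nums (PySem.List.pyGetD tup 0 0) 0 +
       PySem.List.pyGetD nums (PySem.List.pyGetD tup 1 0) 0,
       PySem.List.pyGetD tup 0 0, PySem.List.pyGetD tup 1 0))).any (fun s =>
        s.1 == PySem.List.pyGetD nums i 0 && s.2.1 != i && i != s.2.2) = true ↔
      pvCondA nums i := by
  rw [List.any_map, List.any_eq_true]
  constructor
  · rintro ⟨c, hc, hp⟩
    rw [pv_mem_comb2] at hc
    obtain ⟨a, b, ha, hab, hb, rfl⟩ := hc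
    simp only [Function.comp_apply, Bool.and_eq_true, beq_iff_eq, bne_iff_ne, ne_eq] at hp
    have e0 : PySem.List.pyGetD [a, b] 0 0 = a := by simp [PySem.List.pyGetD]
    have e1 : PySem.List.pyGetD [a, b] 1 0 = b := by simp [PySem.List.pyGetD]
    rw [e0, e1] at hp
    refine ⟨a.toNat, b.toNat, by omega, by omega, ?_, by omega, by omega⟩
    have ca : ((a.toNat : Int)) = a := by omega
    have cb : ((b.toNat : Int)) = b := by omega
    rw [pvG, pvG, ← PySem.List.pyGetD_natCast nums a.toNat 0, ← PySem.List.pyGetD_natCast nums b.toNat 0, ca, cb]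
    exact hp.1.1
  · rintro ⟨j, k, hjk, hk, hsum, hji, hki⟩
    refine ⟨[(j : Int), (k : Int)], ?_, ?_⟩
    · rw [pv_mem_comb2]
      exact ⟨j, k, by omega, by omega, by omega, rfl⟩
    · simp only [Function.comp_apply, Bool.and_eq_true, beq_iff_eq, bne_iff_ne, ne_eq]
      have e0 : PySem.List.pyGetD [(j:Int), (k:Int)] 0 0 = (j:Int) := by simp [PySem.List.pyGetD]
      have e1 : PySem.List.pyGetD [(j:Int), (k:Int)] 1 0 = (k:Int) := by simp [PySem.List.pyGetD]
      rw [e0, e1]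
      refine ⟨⟨?_, hji⟩, fun h => hki h.symm⟩
      rw [PySem.List.pyGetD_natCast, PySem.List.pyGetD_natCast]
      exact hsum

-- B's inner scan finds a usable partner iff pvCondB
theorem pv_B_any (nums : List Int) (i : Int) (x : Int) :
    ((PySem.List.enumerate nums 0).any (fun q =>
      q.1 != i &&
      decide (0 < (PySem.Dict.counter nums).getD (x - q.2) 0
                - (if x - q.2 == x then 1 else 0)
                - (if x - q.2 == q.2 then 1 else 0)))) = true ↔
      pvCondB nums i x := by
  rw [List.any_eq_true]
  constructor
  · rintro ⟨q, hq, hp⟩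
    rw [PySem.List.mem_enumerate_iff] at hq
    obtain ⟨k, hk, rfl⟩ := hq
    simp only [Bool.and_eq_true, bne_iff_ne, ne_eq, decide_eq_true_eq, beq_iff_eq,
      PySem.Dict.getD_counter, zero_add] at hp
    refine ⟨k, hk, hp.1, ?_⟩
    have : pvG nums k = nums[k] := by simp [pvG, List.getD_eq_getElem?_getD, hk]
    rw [this]
    exact hp.2
  · rintro ⟨j, hj, hji, hpos⟩
    refine ⟨((j : Int), nums[j]), ?_, ?_⟩
    · rw [PySem.List.mem_enumerate_iff]; exact ⟨j, hj, by simp⟩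
    · simp only [Bool.and_eq_true, bne_iff_ne, ne_eq, decide_eq_true_eq, beq_iff_eq,
        PySem.Dict.getD_counter]
      have : pvG nums j = nums[j] := by simp [pvG, List.getD_eq_getElem?_getD, hj]
      rw [this] at hpos
      exact ⟨hji, hpos⟩

-- the two found-conditions agree on every valid index
theorem pv_cond_iff (nums : List Int) (i : Nat) (hi : i < nums.length) :
    pvCondA nums (i : Int) ↔ pvCondB nums (i : Int) (pvG nums i) := by
  have hx : PySem.List.pyGetD nums (i : Int) 0 = pvG nums i := by
    rw [PySem.List.pyGetD_natCast]; rfl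
  have key : ∀ j : Nat, j < nums.length → j ≠ i →
      ((0 < (List.count (pvG nums i - pvG nums j) nums : Int)
        - (if pvG nums i - pvG nums j = pvG nums i then 1 else 0)
        - (if pvG nums i - pvG nums j = pvG nums j then 1 else 0)) ↔
       ∃ k, k < nums.length ∧ k ≠ i ∧ k ≠ j ∧ pvG nums k = pvG nums i - pvG nums j) := by
    intro j hj hji
    set y := pvG nums i - pvG nums j with hy
    rw [pv_count_eq_sum]
    have e1 : (if y = pvG nums i then (1:Int) else 0) = (if pvG nums i = y then 1 else 0) := by
      simp only [eq_comm]
    have e2 : (if y = pvG nums j then (1:Int) else 0) = (if pvG nums j = y then 1 else 0) := by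
      simp only [eq_comm]
    rw [e1, e2]
    exact pv_L2 nums.length i j (fun k => pvG nums k = y) hi hj (fun h => hji h.symm)
  constructor
  · rintro ⟨j, k, hjk, hk, hsum, hji, hki⟩
    rw [hx] at hsum
    have hji' : j ≠ i := by omega
    refine ⟨j, by omega, hji, ?_⟩
    rw [key j (by omega) hji']
    exact ⟨k, hk, by omega, by omega, by omega⟩
  · rintro ⟨j, hj, hji, hpos⟩
    have hji' : j ≠ i := by exact_mod_cast fun h => hji (by exact_mod_cast h)
    rw [key j hj hji'] at hpos
    obtain ⟨k, hk, hki, hkj, hS⟩ := hpos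
    rcases Nat.lt_or_ge j k with h | h
    · exact ⟨j, k, h, hk, by rw [hx]; omega, hji, by omega⟩
    · have : k < j := by omega
      exact ⟨k, j, this, hj, by rw [hx]; omega, by omega, hji⟩

-- ===== VERDICT (by name: the statement is the Claim_ definition above) =====
theorem filter_sums_spec : Claim_equal_filter_sums := by
  intro nums _
  show filter_sums nums = filter_sums_alt nums
  simp only [filter_sums, filter_sums_alt]
  rw [PySem.Dict.foldl_insert_getD_add_one_eq_counter,
      PySem.List.foldl_append_singleton_eq_map]
  rw [List.nil_append]
  rw [pv_foldl_skip (l := PySem.List.pyRange 0 (nums.length : Int) 1)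
      (f := fun i => PySem.List.pyGetD nums i 0) (p := fun i =>
      ((PySem.List.combinations (PySem.List.pyRange 0 (nums.length : Int) 1) 2).map (fun tup =>
        (PySem.List.pyGetD nums (PySem.List.pyGetD tup 0 0) 0 +
         PySem.List.pyGetD nums (PySem.List.pyGetD tup 1 0) 0,
         PySem.List.pyGetD tup 0 0, PySem.List.pyGetD tup 1 0))).any (fun s =>
          s.1 == PySem.List.pyGetD nums i 0 && s.2.1 != i && i != s.2.2))]
  rw [pv_foldl_skip]
  rw [PySem.List.enumerate_eq_map_pyRange nums 0,
      List.filter_map, List.map_map]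
  simp only [PySem.List.len_eq, Function.comp_def]
  refine congrArg (List.map _) (List.filter_congr ?_)
  intro i hi
  rw [PySem.List.mem_pyRange_one] at hi
  have hiN : i = ((i.toNat : Nat) : Int) := by omega
  congr 1
  rw [Bool.eq_iff_iff, pv_A_any]
  have henum : PySem.List.enumerate nums 0 =
      List.map (fun j => (j, PySem.List.pyGetD nums j 0)) (PySem.List.pyRange 0 (nums.length : Int) 1) := by
    rw [PySem.List.enumerate_eq_map_pyRange nums 0, PySem.List.len_eq]
  rw [← henum, pv_B_any]
  rw [hiN, PySem.List.pyGetD_natCast]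
  exact pv_cond_iff nums i.toNat (by omega)
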